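-- pv_equiv track=rewrite | github.com/Saint7Sinner6/Learning_Projects | cost_analsys_advanced.py | nightly_count
-- ===== SOURCE A (Python) =====
-- def nightly_count(guests, nights):
--     people_per_night = {}
--     for i in range(1, nights+1):
--         counter = 0
--         for j in guests.values():
--             if i in j:
--                 counter += 1
--         people_per_night[i] = counter
--     return people_per_night
-- ===== SOURCE B (Python) =====
-- def nightly_count(guests, nights):
--     counts = {i: 0 for i in range(1, nights + 1)}
--     for stays in guests.values():
--         for night in dict.fromkeys(stays):
--             if 1 <= night <= nights:
--                 counts[night] += 1
--     return counts
-- ===== Notes on version B (the rewrite author's own statement) =====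
-- stated objective: faster
-- what changed: Instead of scanning every guest's night list once per night (nested loops), B pre-initialises a zero counter for each night 1..nights and makes a single pass over the guest lists, incrementing the counter of each distinct in-range night.
import Mathlib
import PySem

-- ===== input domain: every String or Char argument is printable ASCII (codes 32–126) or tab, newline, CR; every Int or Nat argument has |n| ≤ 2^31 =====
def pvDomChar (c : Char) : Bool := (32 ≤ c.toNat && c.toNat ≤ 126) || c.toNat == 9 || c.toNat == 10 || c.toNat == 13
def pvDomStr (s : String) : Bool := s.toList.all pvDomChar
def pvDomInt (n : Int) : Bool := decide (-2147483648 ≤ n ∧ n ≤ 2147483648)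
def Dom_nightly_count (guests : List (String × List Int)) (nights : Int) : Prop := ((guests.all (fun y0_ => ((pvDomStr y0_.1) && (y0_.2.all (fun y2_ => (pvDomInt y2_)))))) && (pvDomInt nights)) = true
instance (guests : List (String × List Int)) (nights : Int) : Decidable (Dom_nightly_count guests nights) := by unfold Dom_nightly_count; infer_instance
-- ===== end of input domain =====

-- B replaces A's per-night scan of all guest lists (O(nights·total)) by one pass over the
-- guest lists incrementing a pre-initialised counter table (O(nights + total)); same return value.

-- ===== PORT A =====
def nightly_count (guests : List (String × List Int)) (nights : Int) : List (Int × Int) :=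
  ((PySem.List.pyRange 1 (nights + 1) 1).foldl
    (fun people_per_night i =>
      people_per_night.insert i
        ((PySem.Dict.ofList guests).values.foldl
          (fun counter j => if i ∈ j then counter + 1 else counter) (0 : Int)))
    PySem.Dict.empty).items

-- ===== PORT B =====
def nightly_count_alt (guests : List (String × List Int)) (nights : Int) : List (Int × Int) :=
  ((PySem.Dict.ofList guests).values.foldl
    (fun counts stays =>
      (PySem.List.dedup stays).foldl
        (fun counts night =>
          if 1 ≤ night ∧ night ≤ nights then counts.modify night 0 (· + 1) else counts)
        counts)
    ((PySem.List.pyRange 1 (nights + 1) 1).foldl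
      (fun d i => d.insert i (0 : Int)) PySem.Dict.empty)).items

-- ===== PRECONDITION & SPEC =====
def Spec_nightly_count (guests : List (String × List Int)) (nights : Int) (out : List (Int × Int)) : Prop := out = nightly_count_alt guests nights
instance (guests : List (String × List Int)) (nights : Int) (out : List (Int × Int)) : Decidable (Spec_nightly_count guests nights out) := by unfold Spec_nightly_count; infer_instance

-- ===== CLAIM (what is proved, stated in full; the proofs are below) =====
def Claim_equal_nightly_count : Prop := ∀ (guests : List (String × List Int)) (nights : Int), Dom_nightly_count guests nights → Spec_nightly_count guests nights (nightly_count guests nights)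

-- ===== LEMMAS AND PROOFS =====

-- a guarded loop body is a loop over the filtered list
lemma foldl_ite_filter {α β : Type} (p : α → Prop) [DecidablePred p] (g : β → α → β) :
    ∀ (l : List α) (init : β),
      l.foldl (fun d n => if p n then g d n else d) init
        = (l.filter (fun n => decide (p n))).foldl g init := by
  intro l
  induction l with
  | nil => intro init; rfl
  | cons x t ih =>
    intro init
    by_cases hx : p x <;> simp [List.foldl_cons, hx, ih]

-- a nested fold starting from the outer accumulator is a fold over the flatMap
lemma foldl_foldl_flatMap {α β γ : Type} (f : α → List β) (g : γ → β → γ) :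
    ∀ (l : List α) (init : γ),
      l.foldl (fun d x => (f x).foldl g d) init = (l.flatMap f).foldl g init := by
  intro l
  induction l with
  | nil => intro init; rfl
  | cons x t ih => intro init; simp [List.foldl_cons, List.flatMap_cons, List.foldl_append, ih]

-- inserting zeros keeps a zero default lookup
lemma getD_foldl_insert_zero (i : Int) :
    ∀ (l : List Int) (d : PySem.Dict Int Int), d.getD i 0 = 0 →
      (l.foldl (fun d k => d.insert k (0 : Int)) d).getD i 0 = 0 := by
  intro l
  induction l with
  | nil => intro d h; exact h
  | cons x t ih =>
    intro d h
    refine ih _ ?_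
    rw [PySem.Dict.getD_insert]
    split
    · rfl
    · exact h

-- updating a set with elements it already has leaves it unchanged
lemma set_update_of_subset {α : Type} [BEq α] [LawfulBEq α] :
    ∀ (xs : List α) (s : PySem.Set α), (∀ x ∈ xs, x ∈ s) → PySem.Set.update s xs = s := by
  intro xs
  induction xs with
  | nil => intro s _; rfl
  | cons x t ih =>
    intro s h
    have hx : PySem.Set.contains s x = true := (PySem.Set.contains_iff s x).2 (h x (by simp))
    show PySem.Set.update (PySem.Set.add s x) t = s
    rw [show PySem.Set.add s x = s by unfold PySem.Set.add; rw [hx]; rfl]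
    exact ih s (fun y hy => h y (by simp [hy]))

-- A's inner loop counts the lists containing i
lemma foldl_ite_count (i : Int) :
    ∀ (l : List (List Int)) (a : Int),
      l.foldl (fun c j => if i ∈ j then c + 1 else c) a
        = a + (l.countP (fun j => decide (i ∈ j)) : Int) := by
  intro l
  induction l with
  | nil => intro a; simp
  | cons x t ih =>
    intro a
    by_cases hx : i ∈ x <;> simp [List.foldl_cons, hx, ih] <;> ring

-- count of i in a filtered dedup: 1 iff i is in the list (given the guard holds at i)
lemma count_filter_dedup (i : Int) (stays : List Int) (p : Int → Prop) [DecidablePred p]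
    (hpi : p i) :
    ((PySem.List.dedup stays).filter (fun n => decide (p n))).count i
      = if i ∈ stays then 1 else 0 := by
  rw [List.count_filter (by simp [hpi])]
  by_cases h : i ∈ stays
  · simp [h]
  · simp [h, List.count_eq_zero, PySem.Set.mem_ofList]

lemma sum_map_indicator (i : Int) :
    ∀ (vals : List (List Int)),
      (vals.map (fun j => if i ∈ j then (1 : Nat) else 0)).sum
        = vals.countP (fun j => decide (i ∈ j)) := by
  intro vals
  induction vals with
  | nil => rfl
  | cons x t ih => by_cases hx : i ∈ x <;> simp [hx, ih] <;> omega

-- ===== VERDICT (by name: the statement is the Claim_ definition above) =====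
theorem nightly_count_spec : Claim_equal_nightly_count := by
  intro guests nights _
  unfold Spec_nightly_count nightly_count nightly_count_alt
  set vals := (PySem.Dict.ofList guests).values with hvals
  set rng := PySem.List.pyRange 1 (nights + 1) 1 with hrng
  -- rewrite B's nested guarded fold as a single modify-fold over a flat list
  have hB :
      vals.foldl
        (fun counts stays =>
          (PySem.List.dedup stays).foldl
            (fun counts night =>
              if 1 ≤ night ∧ night ≤ nights then counts.modify night 0 (· + 1) else counts)
            counts)
        (rng.foldl (fun d i => d.insert i (0 : Int)) PySem.Dict.empty)
      = (vals.flatMap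
          (fun stays => (PySem.List.dedup stays).filter
            (fun n => decide (1 ≤ n ∧ n ≤ nights)))).foldl
          (fun d x => d.modify x 0 (· + 1))
          (rng.foldl (fun d i => d.insert i (0 : Int)) PySem.Dict.empty) := by
    rw [← foldl_foldl_flatMap]
    refine PySem.List.foldl_congr_mem vals _ _ _ ?_
    intro acc stays _
    exact foldl_ite_filter (fun n => 1 ≤ n ∧ n ≤ nights) _ (PySem.List.dedup stays) acc
  rw [hB]
  set big := vals.flatMap
      (fun stays => (PySem.List.dedup stays).filter (fun n => decide (1 ≤ n ∧ n ≤ nights)))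
    with hbig
  set counts0 := rng.foldl (fun d i => d.insert i (0 : Int)) PySem.Dict.empty with hc0
  -- keys of counts0 are exactly rng
  have hkeys0 : counts0.keys = rng := by
    rw [hc0, show (fun (d : PySem.Dict Int Int) i => d.insert i (0 : Int))
          = fun d i => d.insert i ((fun (_ : PySem.Dict Int Int) (_ : Int) => (0 : Int)) d i) from rfl,
        PySem.Dict.keys_foldl_insert]
    simp only [PySem.Dict.keys_empty, PySem.Set.update_nil_left]
    exact PySem.Set.ofList_eq_self_of_nodup _ (PySem.List.nodup_pyRange_one 1 (nights + 1))
  -- every element of big is in rng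
  have hbigmem : ∀ x ∈ big, x ∈ rng := by
    intro x hx
    rw [hbig] at hx
    obtain ⟨stays, _, hx⟩ := List.mem_flatMap.1 hx
    have := List.of_mem_filter hx
    rw [PySem.List.mem_pyRange_one]
    have h12 : 1 ≤ x ∧ x ≤ nights := by simpa using this
    omega
  -- keys of the final dict are still rng
  have hkeys : ((big.foldl (fun d x => d.modify x 0 (· + 1)) counts0)).keys = rng := by
    rw [show (fun (d : PySem.Dict Int Int) (x : Int) => d.modify x 0 (· + 1))
          = fun d x => d.modify x ((fun (_ : PySem.Dict Int Int) (_ : Int) => (0:Int)) d x)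
              ((fun (_ : PySem.Dict Int Int) (_ : Int) => (fun v => v + 1)) d x) from rfl,
        PySem.Dict.keys_foldl_modify, hkeys0]
    exact set_update_of_subset big rng hbigmem
  -- A's items: a fold of fresh inserts over rng
  have hA : ((rng.foldl
      (fun people_per_night i =>
        people_per_night.insert i
          (vals.foldl (fun counter j => if i ∈ j then counter + 1 else counter) (0 : Int)))
      PySem.Dict.empty)).items
      = rng.map (fun i =>
          (i, vals.foldl (fun counter j => if i ∈ j then counter + 1 else counter) (0 : Int))) := by
    rw [show (fun (d : PySem.Dict Int Int) (i : Int) =>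
          d.insert i (vals.foldl (fun counter j => if i ∈ j then counter + 1 else counter) (0 : Int)))
        = fun d i => d.insert ((fun x : Int => x) i)
            ((fun i => vals.foldl (fun counter j => if i ∈ j then counter + 1 else counter) (0 : Int)) i)
        from rfl,
      PySem.Dict.items_foldl_insert_fresh rng (fun x : Int => x) _ PySem.Dict.empty
        (fun a _ => PySem.Dict.contains_empty a)
        (by simpa using PySem.List.nodup_pyRange_one 1 (nights + 1))]
    simp [show (PySem.Dict.empty : PySem.Dict Int Int).items = [] from rfl]
  rw [hA]
  -- B's items via its (nodup) keys
  have hnodup : ((big.foldl (fun d x => d.modify x 0 (· + 1)) counts0)).keys.Nodup := by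
    rw [hkeys]; exact PySem.List.nodup_pyRange_one 1 (nights + 1)
  rw [PySem.Dict.items_eq_map_keys _ hnodup 0, hkeys]
  refine (List.map_congr_left ?_).symm
  intro i hi
  have hpi : 1 ≤ i ∧ i ≤ nights := by
    have := (PySem.List.mem_pyRange_one).1 (hrng ▸ hi)
    omega
  have hgd : ((big.foldl (fun d x => d.modify x 0 (· + 1)) counts0)).getD i 0
      = counts0.getD i 0 + (big.count i : Int) := by
    simpa using PySem.Dict.getD_foldl_modify_add_one big counts0 i
  have hz : counts0.getD i 0 = 0 := getD_foldl_insert_zero i rng PySem.Dict.empty (by simp)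
  have hcnt : big.count i = vals.countP (fun j => decide (i ∈ j)) := by
    rw [hbig, List.count_flatMap, ← sum_map_indicator i vals]
    congr 1
    refine List.map_congr_left ?_
    intro stays _
    simpa using count_filter_dedup i stays (fun n => 1 ≤ n ∧ n ≤ nights) hpi
  rw [Prod.ext_iff]
  constructor
  · rfl
  · show ((big.foldl (fun d x => d.modify x 0 (· + 1)) counts0)).getD i 0
      = vals.foldl (fun counter j => if i ∈ j then counter + 1 else counter) (0 : Int)
    rw [hgd, hz, hcnt, foldl_ite_count i vals 0]
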